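-- pv_equiv track=rewrite | github.com/mazinka/python_bootcamp_16032019 | 4 dzien/zadanie 3.py | policz_znaki
-- ===== SOURCE A (Python) =====
-- def policz_znaki(tekst, start="<", end=">"):
--     licznik = 0
--     poziom=0
--
--     for el in tekst:
--         if el == end:
--             poziom -= 1
--         elif el == start:
--             poziom +=1
--         else:
--             licznik += poziom
--     return licznik
-- ===== SOURCE B (Python) =====
-- def policz_znaki(tekst, start="<", end=">"):
--     # suffix-contribution formulation: each opening bracket adds, each closing
--     # bracket subtracts, the number of non-bracket characters after it
--     remaining = sum(1 for c in tekst if c != end and c != start)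
--     total = 0
--     for c in tekst:
--         if c == end:
--             total -= remaining
--         elif c == start:
--             total += remaining
--         else:
--             remaining -= 1
--     return total
-- ===== Notes on version B (the rewrite author's own statement) =====
-- stated objective: alternative
-- what changed: B swaps the summation order: instead of maintaining a running nesting level added at each plain character, it precounts the non-bracket characters and has each bracket add/subtract the number of non-bracket characters after it.
import Mathlib
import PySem

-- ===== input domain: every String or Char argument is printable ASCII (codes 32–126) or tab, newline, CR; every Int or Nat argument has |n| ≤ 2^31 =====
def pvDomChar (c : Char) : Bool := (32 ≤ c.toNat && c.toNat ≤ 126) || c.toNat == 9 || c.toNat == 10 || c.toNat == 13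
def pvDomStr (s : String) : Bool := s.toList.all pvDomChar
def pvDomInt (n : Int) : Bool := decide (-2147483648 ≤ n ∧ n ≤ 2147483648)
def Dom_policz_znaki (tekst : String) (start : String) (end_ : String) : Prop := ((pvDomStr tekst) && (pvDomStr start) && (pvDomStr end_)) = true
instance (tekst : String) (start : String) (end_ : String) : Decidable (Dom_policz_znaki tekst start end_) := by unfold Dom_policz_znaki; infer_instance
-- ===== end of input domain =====

-- B replaces A's running nesting level by per-bracket suffix contributions (same cost, different decomposition).

-- ===== PORT A =====
-- A: one pass, state (licznik, poziom); 'el == end' compares the 1-char string [el] with end_.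
def policz_znaki (tekst : String) (start : String) (end_ : String) : Int :=
  (tekst.toList.foldl
    (fun (st : Int × Int) el =>
      if [el] = end_.toList then (st.1, st.2 - 1)
      else if [el] = start.toList then (st.1, st.2 + 1)
      else (st.1 + st.2, st.2))
    (0, 0)).1

-- ===== PORT B =====
-- B: precount the non-bracket characters, then one pass with state (total, remaining).
def policz_znaki_alt (tekst : String) (start : String) (end_ : String) : Int :=
  let remaining : Int :=
    (tekst.toList.countP (fun c => decide ([c] ≠ end_.toList) && decide ([c] ≠ start.toList)) : Int)
  (tekst.toList.foldl
    (fun (st : Int × Int) c =>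
      if [c] = end_.toList then (st.1 - st.2, st.2)
      else if [c] = start.toList then (st.1 + st.2, st.2)
      else (st.1, st.2 - 1))
    (0, remaining)).1

-- ===== PRECONDITION & SPEC =====
def Spec_policz_znaki (tekst : String) (start : String) (end_ : String) (out : Int) : Prop := out = policz_znaki_alt tekst start end_
instance (tekst : String) (start : String) (end_ : String) (out : Int) : Decidable (Spec_policz_znaki tekst start end_ out) := by unfold Spec_policz_znaki; infer_instance

-- ===== CLAIM (what is proved, stated in full; the proofs are below) =====
def Claim_equal_policz_znaki : Prop := ∀ (tekst : String) (start : String) (end_ : String), Dom_policz_znaki tekst start end_ → Spec_policz_znaki tekst start end_ (policz_znaki tekst start end_)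

-- ===== LEMMAS AND PROOFS =====

-- A's fold with accumulator made explicit: first component is affine in the accumulator.
theorem foldA_acc (e s : List Char) (l : List Char) (k p : Int) :
    (l.foldl (fun (st : Int × Int) el =>
      if [el] = e then (st.1, st.2 - 1)
      else if [el] = s then (st.1, st.2 + 1)
      else (st.1 + st.2, st.2)) (k, p)).1
    = k + (l.foldl (fun (st : Int × Int) el =>
      if [el] = e then (st.1, st.2 - 1)
      else if [el] = s then (st.1, st.2 + 1)
      else (st.1 + st.2, st.2)) (0, p)).1 := by
  induction l generalizing k p with
  | nil => simp
  | cons c t ih =>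
    by_cases h1 : [c] = e
    · simp only [List.foldl, if_pos h1]
      rw [ih, ih 0 (p - 1)]
    · by_cases h2 : [c] = s
      · simp only [List.foldl, if_neg h1, if_pos h2]
        rw [ih, ih 0 (p + 1)]
      · simp only [List.foldl, if_neg h1, if_neg h2]
        rw [ih, ih (0 + p) p]; ring

-- B's fold likewise: first component is k plus the fold from (0, r).
theorem foldB_acc (e s : List Char) (l : List Char) (k r : Int) :
    (l.foldl (fun (st : Int × Int) c =>
      if [c] = e then (st.1 - st.2, st.2)
      else if [c] = s then (st.1 + st.2, st.2)
      else (st.1, st.2 - 1)) (k, r)).1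
    = k + (l.foldl (fun (st : Int × Int) c =>
      if [c] = e then (st.1 - st.2, st.2)
      else if [c] = s then (st.1 + st.2, st.2)
      else (st.1, st.2 - 1)) (0, r)).1 := by
  induction l generalizing k r with
  | nil => simp
  | cons c t ih =>
    by_cases h1 : [c] = e
    · simp only [List.foldl, if_pos h1]
      rw [ih, ih (0 - r) r]; ring
    · by_cases h2 : [c] = s
      · simp only [List.foldl, if_neg h1, if_pos h2]
        rw [ih, ih (0 + r) r]; ring
      · simp only [List.foldl, if_neg h1, if_neg h2]
        rw [ih, ih 0 (r - 1)]

-- the count of non-bracket characters of l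
def nbCount (e s : List Char) (l : List Char) : Int :=
  (l.countP (fun c => decide ([c] ≠ e) && decide ([c] ≠ s)) : Int)

theorem nbCount_cons (e s : List Char) (c : Char) (t : List Char) :
    nbCount e s (c :: t)
      = (if [c] = e then nbCount e s t
         else if [c] = s then nbCount e s t
         else nbCount e s t + 1) := by
  by_cases h1 : [c] = e <;> by_cases h2 : [c] = s <;>
    simp [nbCount, h1, h2]

-- the common key lemma: A's fold from level p equals p·(non-bracket count) plus B's fold started at remaining = non-bracket count
theorem key (e s : List Char) (l : List Char) (p : Int) :
    (l.foldl (fun (st : Int × Int) el =>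
      if [el] = e then (st.1, st.2 - 1)
      else if [el] = s then (st.1, st.2 + 1)
      else (st.1 + st.2, st.2)) (0, p)).1
    = p * nbCount e s l +
      (l.foldl (fun (st : Int × Int) c =>
        if [c] = e then (st.1 - st.2, st.2)
        else if [c] = s then (st.1 + st.2, st.2)
        else (st.1, st.2 - 1)) (0, nbCount e s l)).1 := by
  induction l generalizing p with
  | nil => simp [nbCount]
  | cons c t ih =>
    have hn := nbCount_cons e s c t
    by_cases h1 : [c] = e
    · simp only [List.foldl, if_pos h1] at hn ⊢
      rw [hn, ih (p - 1), foldB_acc e s t (0 - nbCount e s t)]; ring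
    · by_cases h2 : [c] = s
      · simp only [List.foldl, if_neg h1, if_pos h2] at hn ⊢
        rw [hn, ih (p + 1), foldB_acc e s t (0 + nbCount e s t)]; ring
      · simp only [List.foldl, if_neg h1, if_neg h2] at hn ⊢
        rw [hn, foldA_acc, ih p]
        have h3 : nbCount e s t + 1 - 1 = nbCount e s t := by ring
        rw [h3]; ring

-- ===== VERDICT (by name: the statement is the Claim_ definition above) =====
theorem policz_znaki_spec : Claim_equal_policz_znaki := by
  intro tekst start end_ _
  unfold Spec_policz_znaki policz_znaki policz_znaki_alt
  have h := key end_.toList start.toList tekst.toList 0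
  simpa [nbCount] using h
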